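-- pv_equiv track=rewrite | github.com/jenych0314/Python | 2021_상반기_과소사/20210520_homework_3.py | solution
-- ===== SOURCE A (Python) =====
-- def solution(string):
--     if len(string)%2 != 0:
--         return 0
--
--     stack = []
--
--     for s in string:
--         if s not in stack:
--             stack.append(s)
--         else:
--             top = stack.pop()
--             if top != s:
--                 stack.append(top)
--                 stack.append(s)
--
--     if len(stack) == 0:
--         return 1
--     else:
--         return 0
-- ===== SOURCE B (Python) =====
-- def solution(string):
--     # Parallel term rewriting: each pass sweeps left to right once, deleting every
--     # (non-overlapping) adjacent equal pair it meets; repeat until a pass changes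
--     # nothing.  The string fully cancels iff the fixpoint is the empty string.
--     s = string
--     while True:
--         out = []
--         i = 0
--         while i < len(s):
--             if i + 1 < len(s) and s[i] == s[i + 1]:
--                 i += 2
--             else:
--                 out.append(s[i])
--                 i += 1
--         t = ''.join(out)
--         if t == s:
--             return 1 if s == "" else 0
--         s = t
-- ===== Notes on version B (the rewrite author's own statement) =====
-- stated objective: alternative
-- what changed: Replaced A's stack machine (push/pop with a whole-stack membership scan plus an odd-length fast path) by a stackless parallel-rewriting fixpoint: each pass sweeps the string once deleting all non-overlapping adjacent equal pairs, repeated until a pass changes nothing, and the answer is whether the residue is empty.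
import Mathlib
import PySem

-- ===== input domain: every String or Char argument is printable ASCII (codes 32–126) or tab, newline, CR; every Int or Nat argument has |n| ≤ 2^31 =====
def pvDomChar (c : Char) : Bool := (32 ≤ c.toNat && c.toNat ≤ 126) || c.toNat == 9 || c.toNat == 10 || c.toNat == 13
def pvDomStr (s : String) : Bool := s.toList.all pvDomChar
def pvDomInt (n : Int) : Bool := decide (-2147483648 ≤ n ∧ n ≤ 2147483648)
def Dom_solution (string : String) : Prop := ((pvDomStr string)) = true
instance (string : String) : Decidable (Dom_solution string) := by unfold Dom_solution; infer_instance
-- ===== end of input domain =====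

-- B replaces A's stack machine (with its whole-stack membership scan and odd-length
-- fast path) by a stackless parallel-rewriting fixpoint: sweep the string deleting
-- all non-overlapping adjacent equal pairs, repeat until a sweep changes nothing.

-- ===== PORT A =====
-- A's stack is stored top-first (head = Python's stack[-1]); membership, pop and the
-- two appends are transcribed step for step.  The empty-stack pop is unreachable
-- (Python's 'else' branch requires s ∈ stack, hence stack nonempty).
def solA_step (stack : List Char) (s : Char) : List Char :=
  if ¬ stack.contains s then
    s :: stack
  else
    match stack with
    | [] => []                         -- unreachable: s ∈ stack forces stack ≠ []
    | top :: rest => if top ≠ s then s :: top :: rest else rest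

def solution (string : String) : Int :=
  if string.toList.length % 2 ≠ 0 then 0
  else
    let stack := string.toList.foldl solA_step []
    if stack.length = 0 then 1 else 0

-- ===== PORT B =====
-- Source B's inner while-loop: one left-to-right sweep deleting every (non-overlapping)
-- adjacent equal pair it meets.
def sweep : List Char → List Char
  | [] => []
  | [a] => [a]
  | a :: b :: t => if a == b then sweep t else a :: sweep (b :: t)
termination_by s => s.length

-- a sweep never grows the string, and a changing sweep strictly shrinks it
-- (cited by sweepFix's decreasing_by below)
theorem sweep_length : ∀ (s : List Char), (sweep s).length ≤ s.length := by
  intro s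
  induction s using sweep.induct with
  | case1 => simp [sweep]
  | case2 a => simp [sweep]
  | case3 a b t hab ih => simp only [sweep, hab, if_true, List.length_cons]; omega
  | case4 a b t hab ih =>
    simp only [sweep, hab, Bool.false_eq_true, if_false, List.length_cons] at *
    omega

theorem sweep_lt : ∀ (s : List Char), sweep s ≠ s → (sweep s).length < s.length := by
  intro s
  induction s using sweep.induct with
  | case1 => intro h; simp [sweep] at h
  | case2 a => intro h; simp [sweep] at h
  | case3 a b t hab ih =>
    intro _
    have := sweep_length t
    simp only [sweep, hab, if_true, List.length_cons]
    omega
  | case4 a b t hab ih =>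
    intro h
    have hs : sweep (a :: b :: t) = a :: sweep (b :: t) := by
      simp [sweep, hab]
    rw [hs] at h ⊢
    have hne : sweep (b :: t) ≠ b :: t := fun he => h (by rw [he])
    have := ih hne
    simp only [List.length_cons] at this ⊢
    omega

-- Source B's outer while-loop: sweep until a pass changes nothing.
def sweepFix (s : List Char) : List Char :=
  if h : sweep s = s then s else sweepFix (sweep s)
termination_by s.length
decreasing_by exact sweep_lt s h

def solution_alt (string : String) : Int :=
  if sweepFix string.toList = [] then 1 else 0

-- ===== PRECONDITION & SPEC =====
def Spec_solution (string : String) (out : Int) : Prop := out = solution_alt string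
instance (string : String) (out : Int) : Decidable (Spec_solution string out) := by unfold Spec_solution; infer_instance

-- ===== CLAIM (what is proved, stated in full; the proofs are below) =====
def Claim_equal_solution : Prop := ∀ (string : String), Dom_solution string → Spec_solution string (solution string)

-- ===== LEMMAS AND PROOFS =====

-- Proof-side normal form of A's step: A never actually uses the membership scan's
-- result beyond the top of the stack.
def stepF (stack : List Char) (s : Char) : List Char :=
  match stack with
  | [] => [s]
  | top :: rest => if top == s then rest else s :: top :: rest

theorem solA_eq_stepF : solA_step = stepF := by
  funext stack s
  cases stack with
  | nil => simp [solA_step, stepF]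
  | cons top rest =>
    by_cases hts : top = s
    · subst hts; simp [solA_step, stepF]
    · by_cases hc : (top :: rest).contains s
      · simp [solA_step, stepF, hc, hts]
      · simp [solA_step, stepF, hc, hts]

-- The stack never holds two equal adjacent elements …
theorem stepF_chain (st : List Char) (c : Char) (h : st.IsChain (· ≠ ·)) :
    (stepF st c).IsChain (· ≠ ·) := by
  cases st with
  | nil => simp only [stepF]; exact List.isChain_singleton c
  | cons top rest =>
    by_cases htc : top = c
    · simp only [stepF, htc, BEq.rfl, if_true]
      exact h.tail
    · have : (top == c) = false := by simp [htc]
      simp only [stepF, this, Bool.false_eq_true, if_false]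
      cases rest with
      | nil =>
        exact List.isChain_pair.mpr (fun he => htc he.symm)
      | cons d r' =>
        exact List.isChain_cons_cons.mpr ⟨fun he => htc he.symm, h⟩

-- … so feeding the same character twice is a no-op.
theorem stepF_cancel (st : List Char) (c : Char) (h : st.IsChain (· ≠ ·)) :
    stepF (stepF st c) c = st := by
  cases st with
  | nil => simp [stepF]
  | cons top rest =>
    by_cases htc : top = c
    · subst htc
      cases rest with
      | nil => simp [stepF]
      | cons d r' =>
        have hne : top ≠ d := h.rel_head
        have hdt : (d == top) = false := by simp [hne.symm]
        simp [stepF, hdt]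
    · have : (top == c) = false := by simp [htc]
      simp [stepF, this]

-- A whole sweep does not change the final stack: each deleted pair is a no-op.
theorem foldl_sweep : ∀ (s st : List Char), st.IsChain (· ≠ ·) →
    s.foldl stepF st = (sweep s).foldl stepF st := by
  intro s
  induction s using sweep.induct with
  | case1 => intro st _; simp [sweep]
  | case2 a => intro st _; simp [sweep]
  | case3 a b t hab ih =>
    intro st hch
    have hb : a = b := by simpa using hab
    subst hb
    simp only [sweep, BEq.rfl, if_true, List.foldl_cons]
    rw [stepF_cancel st a hch]
    exact ih st hch
  | case4 a b t hab ih =>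
    intro st hch
    simp only [sweep, hab, Bool.false_eq_true, if_false, List.foldl_cons]
    exact ih (stepF st a) (stepF_chain st a hch)

-- A fixed point of sweep has no adjacent equal pair …
theorem sweep_fixed_chain : ∀ (s : List Char), sweep s = s → s.IsChain (· ≠ ·) := by
  intro s
  induction s using sweep.induct with
  | case1 => intro _; exact List.isChain_nil
  | case2 a => intro _; exact List.isChain_singleton a
  | case3 a b t hab ih =>
    intro h
    exfalso
    have := sweep_length t
    have hl := congrArg List.length h
    simp only [sweep, hab, if_true, List.length_cons] at hl
    omega
  | case4 a b t hab ih =>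
    intro h
    simp only [sweep, hab, Bool.false_eq_true, if_false, List.cons.injEq, true_and] at h
    exact List.isChain_cons_cons.mpr ⟨by simpa using hab, ih h⟩

-- … and the stack machine just reverses such a string.
theorem foldl_irreducible (s : List Char) (st : List Char)
    (h : (s.reverse ++ st).IsChain (· ≠ ·)) : s.foldl stepF st = s.reverse ++ st := by
  induction s generalizing st with
  | nil => simp
  | cons c t ih =>
    have hpush : stepF st c = c :: st := by
      cases st with
      | nil => simp [stepF]
      | cons d r =>
        have : c ≠ d := by
          have h2 : ((t.reverse ++ [c]) ++ d :: r).IsChain (· ≠ ·) := by simpa using h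
          exact (List.isChain_append.mp h2).2.2 c (by simp) d (by simp)
        have hdc : (d == c) = false := by simp [this.symm]
        simp [stepF, hdc]
    simp only [List.foldl_cons, hpush]
    rw [ih (c :: st) (by simpa using h)]
    simp

-- The machine's final stack is the reverse of the rewriting residue.
theorem foldl_eq_sweepFix (s : List Char) :
    s.foldl stepF [] = (sweepFix s).reverse := by
  induction hn : s.length using Nat.strong_induction_on generalizing s with
  | _ n ih =>
    rw [sweepFix]
    by_cases h : sweep s = s
    · simp only [h, dif_pos]
      have hch : (s.reverse ++ ([] : List Char)).IsChain (· ≠ ·) := by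
        simpa using List.isChain_reverse.mpr
          ((sweep_fixed_chain s h).imp (fun _ _ hne => hne.symm))
      have := foldl_irreducible s [] hch
      simpa using this
    · simp only [h, dif_neg, not_false_iff]
      rw [foldl_sweep s [] List.isChain_nil]
      exact ih (sweep s).length (by subst hn; exact sweep_lt s h) _ rfl

-- Each step flips the parity of the stack length …
theorem stepF_len (st : List Char) (s : Char) :
    (stepF st s).length % 2 = (st.length + 1) % 2 := by
  cases st with
  | nil => simp [stepF]
  | cons top rest =>
    simp only [stepF]
    split
    · simp; omega
    · simp

-- … so an odd-length string leaves a nonempty stack (A's fast path is sound).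
theorem foldl_len (l : List Char) (st : List Char) :
    (l.foldl stepF st).length % 2 = (st.length + l.length) % 2 := by
  induction l generalizing st with
  | nil => simp
  | cons c cs ih =>
    simp only [List.foldl_cons, List.length_cons]
    rw [ih, Nat.add_mod, stepF_len, ← Nat.add_mod]
    omega

-- ===== VERDICT (by name: the statement is the Claim_ definition above) =====
theorem solution_spec : Claim_equal_solution := by
  intro string _
  unfold Spec_solution solution solution_alt
  rw [solA_eq_stepF, foldl_eq_sweepFix]
  by_cases hodd : string.toList.length % 2 ≠ 0
  · have h := foldl_len string.toList []
    rw [foldl_eq_sweepFix] at h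
    simp only [List.length_nil, Nat.zero_add] at h
    have hne : sweepFix string.toList ≠ [] := by
      intro he; rw [he] at h; simp only [List.reverse_nil, List.length_nil] at h; omega
    rw [if_pos hodd, if_neg hne]
  · rw [if_neg hodd]
    by_cases he : sweepFix string.toList = []
    · simp [he]
    · simp [he, List.length_eq_zero_iff]
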